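-- pv_equiv track=rewrite | github.com/anishfelixm/100daysofCP | python/61a_1398B_SubstringRemovalGame.py | solve
-- ===== SOURCE A (Python) =====
-- def solve(s):
--     arr = []
--     i = 0
--     while i < len(s):
--         if s[i] == "1":
--             temp = 0
--             while i < len(s) and s[i] == "1":
--                 temp += 1
--                 i += 1
--             arr.append(temp)
--         else:
--             i += 1
--     cnt = 0
--     arr.sort(reverse=True)
--     for i in range(0,len(arr), 2):
--         cnt += arr[i]
--     return cnt
-- ===== SOURCE B (Python) =====
-- def solve(s):
--     # Counting-sort version: run lengths are bounded by len(s), so bucket-count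
--     # them and walk lengths from largest to smallest, taking every other run.
--     cnt = [0] * (len(s) + 1)
--     run = 0
--     for c in s:
--         if c == "1":
--             run += 1
--         else:
--             cnt[run] += 1
--             run = 0
--     cnt[run] += 1
--     total = 0
--     take = True
--     for length in range(len(s), 0, -1):
--         for _ in range(cnt[length]):
--             if take:
--                 total += length
--             take = not take
--     return total
-- ===== Notes on version B (the rewrite author's own statement) =====
-- stated objective: alternative
-- what changed: Replaces the comparison sort of run lengths with a counting sort (bucket array indexed by run length, walked from largest to smallest while alternating a take flag), trading the O(n log n) sort for an O(n) bucket walk at similar measured cost.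
import Mathlib
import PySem

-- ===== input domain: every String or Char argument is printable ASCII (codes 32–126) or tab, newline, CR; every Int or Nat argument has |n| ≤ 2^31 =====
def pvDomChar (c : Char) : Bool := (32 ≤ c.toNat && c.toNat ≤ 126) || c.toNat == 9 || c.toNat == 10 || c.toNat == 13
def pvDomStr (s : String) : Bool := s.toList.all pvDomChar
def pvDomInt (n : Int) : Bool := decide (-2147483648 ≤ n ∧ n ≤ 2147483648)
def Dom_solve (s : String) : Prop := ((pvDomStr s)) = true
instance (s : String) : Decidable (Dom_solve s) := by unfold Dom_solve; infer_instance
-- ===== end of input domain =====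

-- B replaces A's comparison sort of the run lengths by a counting sort (bucket array
-- indexed by run length, walked from largest to smallest with an alternating take flag).

-- ===== PORT A =====
-- inner `while i < len(s) and s[i] == "1"` loop: returns (temp, i)
def innerA (cs : List Char) (i : Nat) (temp : Int) : Int × Nat :=
  if h : i < cs.length then
    if cs[i] = '1' then innerA cs (i+1) (temp+1) else (temp, i)
  else (temp, i)
termination_by cs.length - i

theorem innerA_snd_ge (cs : List Char) (i : Nat) (temp : Int) : i ≤ (innerA cs i temp).2 := by
  fun_induction innerA cs i temp with
  | case1 i temp h h1 ih => omega
  | case2 => simp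
  | case3 => simp

-- outer `while i < len(s)` loop building arr
def outerA (cs : List Char) (i : Nat) (arr : List Int) : List Int :=
  if h : i < cs.length then
    if h1 : cs[i] = '1' then
      outerA cs (innerA cs i 0).2 (arr ++ [(innerA cs i 0).1])
    else outerA cs (i+1) arr
  else arr
termination_by cs.length - i
decreasing_by
  · have : i + 1 ≤ (innerA cs (i+1) 1).2 := innerA_snd_ge cs (i+1) 1
    have h2 : (innerA cs i 0).2 = (innerA cs (i+1) 1).2 := by
      rw [innerA]; simp [h, h1]
    omega
  · omega

def solve (s : String) : Int :=
  let cs := s.toList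
  let arr := outerA cs 0 []
  let arrS := PySem.List.sorted arr (fun x => x) true
  (PySem.List.pyRange 0 (PySem.List.len arrS) 2).foldl
    (fun cnt i => cnt + PySem.List.pyGetD arrS i 0) 0

-- ===== PORT B =====
-- inner `for _ in range(cnt[length])` loop over state (total, take)
def innerB (L : Int) : Nat → Int × Bool → Int × Bool
  | 0, acc => acc
  | k+1, acc => innerB L k (if acc.2 then acc.1 + L else acc.1, !acc.2)

def solve_alt (s : String) : Int :=
  let cs := s.toList
  let n := cs.length
  let st := cs.foldl
    (fun (st : List Int × Nat) c =>
      if c = '1' then (st.1, st.2 + 1)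
      else (st.1.set st.2 (st.1.getD st.2 0 + 1), 0))
    (List.replicate (n+1) 0, 0)
  let cnt := st.1.set st.2 (st.1.getD st.2 0 + 1)
  let res := (PySem.List.pyRange (n : Int) 0 (-1)).foldl
    (fun (acc : Int × Bool) L => innerB L (cnt.getD L.toNat 0).toNat acc) (0, true)
  res.1

-- ===== PRECONDITION & SPEC =====
def Spec_solve (s : String) (out : Int) : Prop := out = solve_alt s
instance (s : String) (out : Int) : Decidable (Spec_solve s out) := by unfold Spec_solve; infer_instance

-- ===== CLAIM (what is proved, stated in full; the proofs are below) =====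
def Claim_equal_solve : Prop := ∀ (s : String), Dom_solve s → Spec_solve s (solve s)

-- ===== LEMMAS AND PROOFS =====

-- run lengths of the maximal blocks of '1', zero-length runs included (B's multiset)
def runsFrom : Nat → List Char → List Nat
  | r, [] => [r]
  | r, c :: cs => if c = '1' then runsFrom (r+1) cs else r :: runsFrom 0 cs

-- the positive run lengths, in order of appearance (A's arr)
def runsP (cs : List Char) : List Nat := (runsFrom 0 cs).filter (· ≠ 0)

theorem runsFrom_le (cs : List Char) : ∀ r x, x ∈ runsFrom r cs → x ≤ r + cs.length := by
  induction cs with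
  | nil => intro r x hx; simp [runsFrom] at hx; omega
  | cons c cs ih =>
    intro r x hx
    by_cases h : c = '1'
    · simp [runsFrom, h] at hx
      have := ih (r+1) x hx
      simp
      omega
    · simp [runsFrom, h] at hx
      rcases hx with h1 | h1
      · omega
      · have := ih 0 x h1; simp; omega

theorem runsFrom_absorb (cs : List Char) : ∀ r,
    runsFrom r cs = runsFrom (r + (cs.takeWhile (· = '1')).length) (cs.dropWhile (· = '1')) := by
  induction cs with
  | nil => intro r; simp
  | cons c cs ih =>
    intro r
    by_cases h : c = '1'
    · simp [runsFrom, h]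
      rw [ih (r+1)]
      congr 1
      omega
    · simp [h]

-- A's inner while loop counts the leading ones
theorem innerA_eq (cs : List Char) (i : Nat) (temp : Int) :
    innerA cs i temp = (temp + ((cs.drop i).takeWhile (· = '1')).length,
                        i + ((cs.drop i).takeWhile (· = '1')).length) := by
  fun_induction innerA cs i temp with
  | case1 i temp h h1 ih =>
    have hd : cs.drop i = cs[i] :: cs.drop (i+1) := List.drop_eq_getElem_cons h
    rw [hd, List.takeWhile_cons]
    simp [h1, ih]
    constructor
    · ring
    · omega
  | case2 i temp h h1 =>
    have hd : cs.drop i = cs[i] :: cs.drop (i+1) := List.drop_eq_getElem_cons h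
    rw [hd, List.takeWhile_cons]
    simp [h1]
  | case3 i temp h =>
    have : cs.drop i = [] := List.drop_eq_nil_of_le (by omega)
    simp [this]

theorem runsP_head_one (l : List Char) (hl : 0 < (l.takeWhile (· = '1')).length) :
    runsP l = (l.takeWhile (· = '1')).length :: runsP (l.drop (l.takeWhile (· = '1')).length) := by
  set t := (l.takeWhile (· = '1')).length with ht
  have hdrop : l.drop t = l.dropWhile (· = '1') := by
    conv_lhs => rw [← List.takeWhile_append_dropWhile (p := (· = '1')) (l := l)]
    rw [ht, List.drop_left]
  have hhead : ∃ h : 0 < l.length, l[0] = '1' := by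
    cases l with
    | nil => simp at ht; omega
    | cons a l' =>
      refine ⟨by simp, ?_⟩
      show a = '1'
      by_contra hne
      rw [List.takeWhile_cons] at ht
      simp [hne] at ht
      omega
  unfold runsP
  rw [runsFrom_absorb, hdrop]
  rcases hw : l.dropWhile (· = '1') with _ | ⟨c, rest⟩
  · simp [runsFrom, ht]
    exact hhead
  · have hc : ¬ (c = '1') := by
      have := List.head?_dropWhile_not (p := (· = '1')) (l := l)
      rw [hw] at this
      simpa using this
    simp [runsFrom, hc, ht]
    rw [List.filter_cons_of_pos (by simp; omega)]

theorem runsP_head_other (c : Char) (rest : List Char) (hc : ¬ (c = '1')) :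
    runsP (c :: rest) = runsP rest := by
  simp [runsP, runsFrom, hc]

-- A's outer loop produces the positive run lengths in order
theorem outerA_eq (cs : List Char) (i : Nat) (arr : List Int) :
    outerA cs i arr = arr ++ (runsP (cs.drop i)).map (fun (k : Nat) => (k : Int)) := by
  fun_induction outerA cs i arr with
  | case1 i arr h h1 ih =>
    rw [ih]
    have hd : cs.drop i = cs[i] :: cs.drop (i+1) := List.drop_eq_getElem_cons h
    have hlead : 0 < ((cs.drop i).takeWhile (· = '1')).length := by
      rw [hd, List.takeWhile_cons]
      simp [h1]
    rw [innerA_eq cs i 0]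
    have hdrop2 : cs.drop (i + ((cs.drop i).takeWhile (· = '1')).length)
        = (cs.drop i).drop ((cs.drop i).takeWhile (· = '1')).length := by
      rw [List.drop_drop]
    rw [hdrop2]
    rw [runsP_head_one (cs.drop i) hlead]
    simp
  | case2 i arr h h1 ih =>
    rw [ih]
    have hd : cs.drop i = cs[i] :: cs.drop (i+1) := List.drop_eq_getElem_cons h
    rw [hd, runsP_head_other _ _ h1]
  | case3 i arr h =>
    have : cs.drop i = [] := List.drop_eq_nil_of_le (by omega)
    simp [this, runsP, runsFrom]

-- alternating sum with a take flag (B's walk), and A's even-index sum equals it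
def altSumB : List Int → Bool → Int
  | [], _ => 0
  | a :: r, k => (if k then a else 0) + altSumB r (!k)

theorem pyRange_two_cons (a b : Int) (h : a < b) :
    PySem.List.pyRange a b 2 = a :: PySem.List.pyRange (a+2) b 2 := by
  rw [PySem.List.pyRange_of_pos a b (by norm_num), PySem.List.pyRange_of_pos (a+2) b (by norm_num)]
  by_cases h2 : a + 2 < b
  · have hn : ((b - a + 2 - 1) / 2).toNat = ((b - (a+2) + 2 - 1) / 2).toNat + 1 := by omega
    simp only [if_pos h, if_pos h2, hn, List.range_succ_eq_map]
    simp [List.map_map]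
    intro k _
    ring
  · have hn : ((b - a + 2 - 1) / 2).toNat = 1 := by omega
    simp only [if_pos h, if_neg h2, hn]
    simp

theorem pyRange_shift (a b c s : Int) (hs : 0 < s) :
    PySem.List.pyRange (a+c) (b+c) s = (PySem.List.pyRange a b s).map (· + c) := by
  rw [PySem.List.pyRange_of_pos _ _ hs, PySem.List.pyRange_of_pos _ _ hs]
  have h1 : ∀ n : Nat, (if a + c < b + c then n else 0) = (if a < b then n else 0) := by
    intro n; split_ifs with u v <;> first | rfl | omega
  rw [show b + c - (a + c) = b - a by ring, h1, List.map_map]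
  apply List.map_congr_left
  intro k _
  simp; ring

def evenSum : List Int → Int
  | [] => 0
  | [a] => a
  | a :: _ :: r => a + evenSum r

theorem evenSum_eq_altSumB (l : List Int) : evenSum l = altSumB l true := by
  fun_induction evenSum l with
  | case1 => rfl
  | case2 a => simp [altSumB]
  | case3 a b r ih => simp [altSumB, ih]

theorem evenFold_eq_evenSum (l : List Int) : ∀ acc : Int,
    (PySem.List.pyRange 0 (l.length : Int) 2).foldl
      (fun cnt i => cnt + PySem.List.pyGetD l i 0) acc = acc + evenSum l := by
  fun_induction evenSum l with
  | case1 =>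
    intro acc
    rw [PySem.List.pyRange_of_pos _ _ (by norm_num)]
    simp
  | case2 a =>
    intro acc
    rw [show (([a] : List Int).length : Int) = 1 by simp, pyRange_two_cons 0 1 (by norm_num),
      PySem.List.pyRange_of_pos (0+2) 1 (by norm_num)]
    simp [PySem.List.pyGetD]
  | case3 a b r ih =>
    intro acc
    have hlen : ((a :: b :: r).length : Int) = (r.length : Int) + 2 := by simp; ring
    rw [hlen, pyRange_two_cons 0 ((r.length : Int) + 2) (by positivity)]
    have hsh : PySem.List.pyRange ((0:Int)+2) ((r.length : Int)+2) 2
        = (PySem.List.pyRange 0 (r.length : Int) 2).map (· + 2) := pyRange_shift _ _ 2 2 (by norm_num)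
    simp only [List.foldl_cons, show (0:Int)+2 = 2 from by norm_num] at hsh ⊢
    rw [hsh, List.foldl_map]
    have hcongr : ∀ acc' : Int,
        (PySem.List.pyRange 0 (r.length : Int) 2).foldl
        (fun cnt i => cnt + PySem.List.pyGetD (a :: b :: r) (i + 2) 0) acc'
        = (PySem.List.pyRange 0 (r.length : Int) 2).foldl
        (fun cnt i => cnt + PySem.List.pyGetD r i 0) acc' := by
      intro acc'
      apply PySem.List.foldl_congr_mem
      intro acc'' x hx
      have hx0 : 0 ≤ x := by
        rcases (PySem.List.mem_pyRange_iff_of_pos (by norm_num) x).1 hx with ⟨h1, _, _⟩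
        exact h1
      congr 1
      rw [show x + 2 = ((x.toNat + 2 : Nat) : Int) from by omega, PySem.List.pyGetD_natCast,
        show x = ((x.toNat : Nat) : Int) from by omega, PySem.List.pyGetD_natCast]
      simp [max_eq_left hx0]
    rw [hcongr, ih]
    simp [PySem.List.pyGetD]
    ring

-- ===== B-side: the bucket pass counts the runs =====

def addRuns (cnt : List Int) (l : List Nat) : List Int :=
  l.foldl (fun c L => c.set L (c.getD L 0 + 1)) cnt

theorem bucket_spec (cs : List Char) : ∀ (cnt : List Int) (run : Nat),
    (let st := cs.foldl
      (fun (st : List Int × Nat) c =>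
        if c = '1' then (st.1, st.2 + 1)
        else (st.1.set st.2 (st.1.getD st.2 0 + 1), 0)) (cnt, run)
     st.1.set st.2 (st.1.getD st.2 0 + 1))
    = addRuns cnt (runsFrom run cs) := by
  induction cs with
  | nil => intro cnt run; simp [runsFrom, addRuns]
  | cons c cs ih =>
    intro cnt run
    by_cases h : c = '1'
    · simp only [List.foldl_cons, if_pos h, runsFrom]
      exact ih cnt (run+1)
    · simp only [List.foldl_cons, if_neg h, runsFrom]
      simp only [addRuns, List.foldl_cons]
      exact ih _ 0

theorem getD_addRuns (l : List Nat) : ∀ (cnt : List Int) (L : Nat), L < cnt.length →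
    (∀ x ∈ l, x < cnt.length) →
    (addRuns cnt l).getD L 0 = cnt.getD L 0 + (l.count L : Int) := by
  induction l with
  | nil => intro cnt L _ _; simp [addRuns]
  | cons x l ih =>
    intro cnt L hL hx
    have hxlen : x < cnt.length := hx x (by simp)
    simp only [addRuns, List.foldl_cons]
    rw [show (List.foldl (fun c L => c.set L (c.getD L 0 + 1)) (cnt.set x (cnt.getD x 0 + 1)) l)
        = addRuns (cnt.set x (cnt.getD x 0 + 1)) l from rfl]
    rw [ih _ L (by simpa using hL) (by intro y hy; simpa using hx y (by simp [hy]))]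
    by_cases hxL : x = L
    · subst hxL
      rw [List.getD_eq_getElem?_getD, List.getElem?_set_self (by omega)]
      simp [List.getD_eq_getElem?_getD]
      ring
    · rw [List.getD_eq_getElem?_getD, List.getElem?_set_ne hxL]
      have hcount : (x :: l).count L = l.count L := by
        rw [List.count_cons, if_neg (by simp only [beq_iff_eq]; exact hxL)]
        omega
      rw [hcount, List.getD_eq_getElem?_getD]

-- ===== B-side: the countdown walk is the descending sort =====

def altFoldI : List Int → Int × Bool → Int × Bool
  | [], acc => acc
  | a :: r, acc => altFoldI r (if acc.2 then acc.1 + a else acc.1, !acc.2)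

theorem innerB_eq (L : Int) : ∀ (k : Nat) (acc : Int × Bool),
    innerB L k acc = altFoldI (List.replicate k L) acc := by
  intro k
  induction k with
  | zero => intro acc; rfl
  | succ k ih => intro acc; simp [innerB, altFoldI, List.replicate_succ, ih]

theorem altFoldI_append (xs ys : List Int) : ∀ acc,
    altFoldI (xs ++ ys) acc = altFoldI ys (altFoldI xs acc) := by
  induction xs with
  | nil => intro acc; rfl
  | cons a xs ih => intro acc; simp [altFoldI, ih]

theorem foldl_altFoldI (g : Int → List Int) (l : List Int) : ∀ acc,
    l.foldl (fun a x => altFoldI (g x) a) acc = altFoldI (l.flatMap g) acc := by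
  induction l with
  | nil => intro acc; rfl
  | cons x l ih => intro acc; simp [List.foldl_cons, List.flatMap_cons, altFoldI_append, ih]

theorem altFoldI_fst (l : List Int) : ∀ (t : Int) (k : Bool),
    (altFoldI l (t, k)).1 = t + altSumB l k := by
  induction l with
  | nil => intro t k; simp [altFoldI, altSumB]
  | cons a r ih =>
    intro t k
    simp only [altFoldI, altSumB]
    rw [ih]
    cases k
    · simp
    · simp
      ring

-- the flatMap of replicate-blocks over the countdown range, for a count function c
theorem desc_pairwise (c : Int → Nat) : ∀ (k : Nat),
    ((PySem.List.pyRange (k : Int) 0 (-1)).flatMap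
      (fun L => List.replicate (c L) L)).Pairwise (fun a b => b ≤ a)
    ∧ ∀ x ∈ (PySem.List.pyRange (k : Int) 0 (-1)).flatMap
      (fun L => List.replicate (c L) L), 0 < x ∧ x ≤ (k : Int) := by
  intro k
  induction k with
  | zero =>
    rw [PySem.List.pyRange_neg_one_eq_nil (by norm_num)]
    simp
  | succ k ih =>
    rw [PySem.List.pyRange_neg_one_cons (by exact_mod_cast Nat.succ_pos k)]
    rw [show (((k+1:Nat)) : Int) - 1 = (k : Int) by push_cast; ring]
    simp only [List.flatMap_cons]
    constructor
    · rw [List.pairwise_append]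
      refine ⟨List.pairwise_replicate.2 (by simp), ih.1, ?_⟩
      intro x hx y hy
      have := (ih.2 y hy).2
      have hxv : x = ((k:Nat)+1 : Int) := by
        simpa using List.eq_of_mem_replicate hx
      omega
    · intro x hx
      rcases List.mem_append.1 hx with h1 | h1
      · have hxv : x = ((k:Nat)+1 : Int) := by simpa using List.eq_of_mem_replicate h1
        push_cast
        omega
      · have := ih.2 x h1
        push_cast
        omega

theorem desc_count (c : Int → Nat) : ∀ (k : Nat) (v : Int),
    ((PySem.List.pyRange (k : Int) 0 (-1)).flatMap
      (fun L => List.replicate (c L) L)).count v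
    = if 1 ≤ v ∧ v ≤ (k : Int) then c v else 0 := by
  intro k
  induction k with
  | zero =>
    intro v
    rw [PySem.List.pyRange_neg_one_eq_nil (by norm_num)]
    simp
    omega
  | succ k ih =>
    intro v
    rw [PySem.List.pyRange_neg_one_cons (by exact_mod_cast Nat.succ_pos k)]
    rw [show (((k+1:Nat)) : Int) - 1 = (k : Int) by push_cast; ring]
    simp only [List.flatMap_cons, List.count_append, List.count_replicate, ih v]
    by_cases hv : v = ((k:Nat)+1 : Int)
    · subst hv
      simp
    · rw [if_neg (by simp only [beq_iff_eq]; push_cast; exact fun hh => hv hh.symm)]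
      by_cases h2 : 1 ≤ v ∧ v ≤ (k : Int)
      · have h3 : 1 ≤ v ∧ v ≤ ((k:Nat)+1 : Int) := by push_cast at *; omega
        simp [h2, h3]
      · have h3 : ¬ (1 ≤ v ∧ v ≤ ((k:Nat)+1 : Int)) := by push_cast at *; omega
        simp [h2, h3]

-- main equivalence
theorem solve_eq_solve_alt (s : String) : solve s = solve_alt s := by
  unfold solve solve_alt
  set cs := s.toList with hcs
  -- B's bucket array
  set cnt := addRuns (List.replicate (cs.length+1) 0) (runsFrom 0 cs) with hcnt
  have hbucket := bucket_spec cs (List.replicate (cs.length+1) 0) 0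
  simp only [] at hbucket ⊢
  rw [hbucket]
  -- B's result: walk of the flatMap list
  set cfun : Int → Nat := fun L => (cnt.getD L.toNat 0).toNat with hcfun
  have hinner : ∀ (acc : Int × Bool) (L : Int),
      innerB L (cnt.getD L.toNat 0).toNat acc
      = altFoldI (List.replicate (cfun L) L) acc := by
    intro acc L; rw [innerB_eq]
  set desc := (PySem.List.pyRange (cs.length : Int) 0 (-1)).flatMap
      (fun L => List.replicate (cfun L) L) with hdesc
  have hB : ((PySem.List.pyRange (cs.length : Int) 0 (-1)).foldl
      (fun (acc : Int × Bool) L => innerB L (cnt.getD L.toNat 0).toNat acc) (0, true)).1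
      = altSumB desc true := by
    have := PySem.List.foldl_congr_mem
      (l := PySem.List.pyRange (cs.length : Int) 0 (-1))
      (f := fun (acc : Int × Bool) L => innerB L (cnt.getD L.toNat 0).toNat acc)
      (g := fun (acc : Int × Bool) L => altFoldI (List.replicate (cfun L) L) acc)
      (init := ((0 : Int), true)) (by intro acc x _; exact hinner acc x)
    rw [this, foldl_altFoldI, ← hdesc, altFoldI_fst]
    simp
  rw [hB]
  -- A's arr is the run-length list
  rw [outerA_eq cs 0 []]
  simp only [List.drop_zero, List.nil_append]
  set mi : List Int := (runsP cs).map (fun (k : Nat) => (k : Int)) with hmi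
  -- counts agree, so desc is a permutation of mi
  have hmem_runs : ∀ x ∈ runsFrom 0 cs, x < cs.length + 1 := by
    intro x hx
    have := runsFrom_le cs 0 x hx
    omega
  have hcount_cnt : ∀ L : Nat, L < cs.length + 1 →
      cnt.getD L 0 = ((runsFrom 0 cs).count L : Int) := by
    intro L hL
    rw [hcnt, getD_addRuns _ _ L (by simp; omega) (by simpa using hmem_runs)]
    simp
  have hcount_mi : ∀ v : Int, mi.count v = desc.count v := by
    intro v
    rw [hdesc, desc_count cfun cs.length v]
    by_cases hv : 1 ≤ v ∧ v ≤ (cs.length : Int)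
    · rw [if_pos hv]
      have hvnat : v = ((v.toNat : Nat) : Int) := by omega
      have h1 : mi.count v = (runsP cs).count v.toNat := by
        rw [hmi, hvnat]
        exact List.count_map_of_injective _ _ (fun a b h => by omega) _
      have h2 : (runsP cs).count v.toNat = (runsFrom 0 cs).count v.toNat := by
        rw [runsP]
        refine List.count_filter ?_
        simp
        omega
      rw [h1, h2, hcfun]
      simp only []
      rw [hcount_cnt v.toNat (by omega)]
      simp
    · rw [if_neg hv]
      rw [hmi, List.count_eq_zero]
      intro hmem
      simp only [List.mem_map] at hmem
      rcases hmem with ⟨x, hx, hxv⟩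
      rw [runsP] at hx
      have hx1 : x ≠ 0 := by
        have := List.of_mem_filter hx
        simpa using this
      have hx2 : x ≤ cs.length := by
        have := runsFrom_le cs 0 x (List.mem_of_mem_filter hx)
        omega
      apply hv
      constructor <;> omega
  have hperm : desc.Perm mi := by
    rw [List.perm_iff_count]
    intro v
    rw [hcount_mi v]
  -- desc is sorted descending, hence equals A's sorted list
  have hsorted : PySem.List.sorted mi (fun x => x) true = desc := by
    apply List.Perm.eq_of_pairwise (le := fun (a b : Int) => b ≤ a)
      (fun a b _ _ h1 h2 => le_antisymm h2 h1)
      (PySem.List.sorted_pairwise_rev mi (fun x => x))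
      ((desc_pairwise cfun cs.length).1)
      ((PySem.List.sorted_perm mi (fun x => x) true).trans hperm.symm)
  rw [hsorted]
  -- A's even-index fold is the alternating sum
  have h1 := evenFold_eq_evenSum desc 0
  rw [show PySem.List.len desc = (desc.length : Int) from rfl]
  rw [h1, evenSum_eq_altSumB]
  simp

-- ===== VERDICT (by name: the statement is the Claim_ definition above) =====
theorem solve_spec : Claim_equal_solve := by
  intro s _
  unfold Spec_solve
  exact solve_eq_solve_alt s
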